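-- pv_equiv track=rewrite | github.com/CommentingTryhard/computing-projects | CTFscripts/unscramble.py | unscramble
-- ===== SOURCE A (Python) =====
-- def switch_bits(c, p1, p2):
--     """
--     Swap the bits at positions p1 and p2 in the binary representation of character c.
--     """
--     mask1 = 1 << p1
--     mask2 = 1 << p2
--     bit1 = c & mask1
--     bit2 = c & mask2
--     rest = c & ~(mask1 | mask2)
--     shift = p2 - p1
--     result = (bit1 << shift) | (bit2 >> shift) | rest
--     return result
--
-- def unscramble(scrambled):
--     """
--     Reverse the scrambling logic to recover the original password.
--     """
--     scrambled = [ord(c) for c in scrambled]  # Convert chars to their ASCII values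
--     for i in range(len(scrambled)):
--         c = scrambled[i]
--         # Apply switchBits in reverse order
--         c = switch_bits(c, 6, 7)
--         c = switch_bits(c, 2, 5)
--         c = switch_bits(c, 3, 4)
--         c = switch_bits(c, 0, 1)
--         c = switch_bits(c, 4, 7)
--         c = switch_bits(c, 5, 6)
--         c = switch_bits(c, 0, 3)
--         c = switch_bits(c, 1, 2)
--         scrambled[i] = c
--     return ''.join(chr(c) for c in scrambled)
-- ===== SOURCE B (Python) =====
-- # The eight sequential bit swaps in A compose to one fixed permutation of
-- # bits 0..7: bit i of the input moves to position _PERM[i].  B applies that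
-- # net permutation directly, one pass per character; bits above 7 are kept.
-- _PERM = [2, 3, 6, 7, 0, 1, 4, 5]
--
-- def _permute(v):
--     out = v & ~0xFF
--     for i, p in enumerate(_PERM):
--         out |= ((v >> i) & 1) << p
--     return out
--
-- def unscramble(scrambled):
--     return ''.join(chr(_permute(ord(c))) for c in scrambled)
-- ===== Notes on version B (the rewrite author's own statement) =====
-- stated objective: simpler
-- what changed: A applies eight sequential two-bit swap function calls to each character; B applies the single composed bit permutation [2,3,6,7,0,1,4,5] in one pass per character (preserving bits above 7), removing seven of the eight per-char passes/calls.
import Mathlib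
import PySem

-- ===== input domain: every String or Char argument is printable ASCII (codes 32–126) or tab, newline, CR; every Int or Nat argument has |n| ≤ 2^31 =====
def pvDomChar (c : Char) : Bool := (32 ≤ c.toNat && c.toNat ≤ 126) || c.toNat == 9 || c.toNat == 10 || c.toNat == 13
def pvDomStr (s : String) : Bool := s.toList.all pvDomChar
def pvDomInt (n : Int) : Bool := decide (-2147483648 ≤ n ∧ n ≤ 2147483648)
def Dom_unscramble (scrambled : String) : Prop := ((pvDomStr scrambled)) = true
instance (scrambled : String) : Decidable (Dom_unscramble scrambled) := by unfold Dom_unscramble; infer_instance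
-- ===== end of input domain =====

-- B replaces A's eight sequential bit swaps per character by the single composed
-- bit permutation applied in one pass (objective: simpler).

-- ===== PORT A =====
-- switch_bits: bit positions are the literal non-negative constants of A's calls,
-- so Nat shift amounts are exact (p2 > p1 in every call, so shift = p2 - p1 ≥ 0).
def switchBits (c : Int) (p1 p2 : Nat) : Int :=
  let mask1 : Int := 1 <<< p1
  let mask2 : Int := 1 <<< p2
  let bit1 : Int := PySem.Int.band c mask1
  let bit2 : Int := PySem.Int.band c mask2
  let rest : Int := PySem.Int.band c (Int.not (PySem.Int.bor mask1 mask2))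
  let shift : Nat := p2 - p1
  PySem.Int.bor (PySem.Int.bor (bit1 <<< shift) (bit2 >>> shift)) rest

-- the body of A's for-loop (applied to each element independently)
def unscrambleChar (c0 : Int) : Int :=
  let c := switchBits c0 6 7
  let c := switchBits c 2 5
  let c := switchBits c 3 4
  let c := switchBits c 0 1
  let c := switchBits c 4 7
  let c := switchBits c 5 6
  let c := switchBits c 0 3
  let c := switchBits c 1 2
  c

def unscramble (scrambled : String) : String :=
  let ords := scrambled.toList.map (fun ch => (ch.toNat : Int))   -- [ord(c) for c in scrambled]
  let ords := ords.map unscrambleChar                             -- the for-loop (in-place per element)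
  String.ofList (ords.map (fun c => Char.ofNat c.toNat))              -- ''.join(chr(c) …)

-- ===== PORT B =====
def permList : List Nat := [2, 3, 6, 7, 0, 1, 4, 5]

-- enumerate indices are the Nats 0..7, so '.toNat' on them is exact
def permuteByte (v : Int) : Int :=
  (PySem.List.enumerate permList).foldl
    (fun out ip => PySem.Int.bor out ((PySem.Int.band (v >>> ip.1.toNat) 1) <<< ip.2))
    (PySem.Int.band v (Int.not (255 : Int)))

def unscramble_alt (scrambled : String) : String :=
  String.ofList (scrambled.toList.map (fun c => Char.ofNat (permuteByte (c.toNat : Int)).toNat))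

-- ===== PRECONDITION & SPEC =====
def Spec_unscramble (scrambled : String) (out : String) : Prop := out = unscramble_alt scrambled
instance (scrambled : String) (out : String) : Decidable (Spec_unscramble scrambled out) := by unfold Spec_unscramble; infer_instance

-- ===== CLAIM (what is proved, stated in full; the proofs are below) =====
def Claim_equal_unscramble : Prop := ∀ (scrambled : String), Dom_unscramble scrambled → Spec_unscramble scrambled (unscramble scrambled)

-- ===== LEMMAS AND PROOFS =====
-- the two per-character transforms agree on every byte value a domain character can have
set_option maxRecDepth 100000 in
set_option maxHeartbeats 2000000 in
theorem char_step_eq : ∀ n : Nat, n < 128 → unscrambleChar (Int.ofNat n) = permuteByte (Int.ofNat n) := by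
  decide

-- ===== VERDICT (by name: the statement is the Claim_ definition above) =====
set_option maxHeartbeats 1000000 in
theorem unscramble_spec : Claim_equal_unscramble := by
  intro s hdom
  unfold Spec_unscramble unscramble unscramble_alt
  simp only [List.map_map]
  congr 1
  apply List.map_congr_left
  intro c hc
  have hd : pvDomChar c = true := by
    have := (List.all_eq_true.mp hdom) c hc
    exact this
  have hlt : c.toNat < 128 := by
    simp [pvDomChar] at hd
    omega
  have := char_step_eq c.toNat hlt
  simp only [Function.comp]
  rw [Int.ofNat_eq_natCast] at this
  rw [this]
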